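-- pv_equiv track=rewrite | github.com/Lukasz1928/NLP | lab9/src/frequencies.py | merge_freqs
-- ===== SOURCE A (Python) =====
-- def merge_freqs(d1, d2):
--     s1 = {k: v for (k, v) in d1}
--     s2 = {k: v for (k, v) in d2}
--     s12 = {k: 0 for k in list(s1.keys()) + list(s2.keys())}
--     for k, v in d1:
--         s12[k] += v
--     for k, v in d2:
--         s12[k] += v
--     return [(k, v) for k, v in s12.items()]
-- ===== SOURCE B (Python) =====
-- def merge_freqs(d1, d2):
--     pairs = d1 + d2
--     keys = []
--     for k, _ in pairs:
--         if k not in keys: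
--             keys.append(k)
--     return [(k, sum(v for k2, v in pairs if k2 == k)) for k in keys]
-- ===== Notes on version B (the rewrite author's own statement) =====
-- stated objective: alternative
-- what changed: Replaces A's dict-based three-pass accumulation (two throwaway key dicts, zero-init pass, two += passes) with a dict-free nested-scan: dedup keys in first-appearance order over d1+d2, then compute each key's total by summing its matches in one comprehension scan; correct because a key's merged count is exactly the sum of all its occurrences and the output order is first appearance.
import Mathlib
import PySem

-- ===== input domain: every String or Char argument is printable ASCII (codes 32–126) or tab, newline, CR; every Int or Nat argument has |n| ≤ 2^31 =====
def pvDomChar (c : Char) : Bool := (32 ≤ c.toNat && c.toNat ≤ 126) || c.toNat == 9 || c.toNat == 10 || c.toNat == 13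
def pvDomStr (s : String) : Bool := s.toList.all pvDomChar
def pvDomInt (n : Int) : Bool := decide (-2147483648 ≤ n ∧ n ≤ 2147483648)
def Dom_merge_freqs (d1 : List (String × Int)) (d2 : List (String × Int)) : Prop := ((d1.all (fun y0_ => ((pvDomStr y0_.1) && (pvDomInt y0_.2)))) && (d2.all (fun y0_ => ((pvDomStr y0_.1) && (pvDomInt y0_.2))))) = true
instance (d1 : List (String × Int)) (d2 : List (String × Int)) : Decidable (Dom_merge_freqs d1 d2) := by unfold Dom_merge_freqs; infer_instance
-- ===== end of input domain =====

-- B replaces A's dict-based three-pass accumulation with a dict-free nested scan: dedup keys in first-appearance order, then one summing scan per key (objective: alternative).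


-- ===== PORT A =====
def merge_freqs (d1 : List (String × Int)) (d2 : List (String × Int)) : List (String × Int) :=
  -- s1 = {k: v for (k, v) in d1};  s2 = {k: v for (k, v) in d2}
  let s1 : PySem.Dict String Int := d1.foldl (fun d p => d.insert p.1 p.2) PySem.Dict.empty
  let s2 : PySem.Dict String Int := d2.foldl (fun d p => d.insert p.1 p.2) PySem.Dict.empty
  -- s12 = {k: 0 for k in list(s1.keys()) + list(s2.keys())}
  let s12 : PySem.Dict String Int := (s1.keys ++ s2.keys).foldl (fun d k => d.insert k 0) PySem.Dict.empty
  -- for k, v in d1: s12[k] += v   (the key is always present, so 'modify' is exact here)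
  let s12a := d1.foldl (fun d p => d.modify p.1 0 (· + p.2)) s12
  -- for k, v in d2: s12[k] += v
  let s12b := d2.foldl (fun d p => d.modify p.1 0 (· + p.2)) s12a
  -- [(k, v) for k, v in s12.items()]
  s12b.items

-- ===== PORT B =====
def merge_freqs_alt (d1 : List (String × Int)) (d2 : List (String × Int)) : List (String × Int) :=
  -- pairs = d1 + d2
  let pairs := d1 ++ d2
  -- keys = []; for k, _ in pairs: if k not in keys: keys.append(k)
  let keys : List String := pairs.foldl (fun acc p => if acc.contains p.1 then acc else acc ++ [p.1]) []
  -- [(k, sum(v for k2, v in pairs if k2 == k)) for k in keys]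
  keys.map (fun k => (k, ((pairs.filter (fun p => p.1 == k)).map (·.2)).sum))

-- ===== PRECONDITION & SPEC =====
def Spec_merge_freqs (d1 : List (String × Int)) (d2 : List (String × Int)) (out : List (String × Int)) : Prop := out = merge_freqs_alt d1 d2
instance (d1 : List (String × Int)) (d2 : List (String × Int)) (out : List (String × Int)) : Decidable (Spec_merge_freqs d1 d2 out) := by unfold Spec_merge_freqs; infer_instance

-- ===== CLAIM (what is proved, stated in full; the proofs are below) =====
def Claim_equal_merge_freqs : Prop := ∀ (d1 : List (String × Int)) (d2 : List (String × Int)), Dom_merge_freqs d1 d2 → Spec_merge_freqs d1 d2 (merge_freqs d1 d2)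

-- ===== LEMMAS AND PROOFS =====

-- B's membership-append loop is the standard first-occurrence dedup (PySem.Set.ofList)
theorem foldl_append_if_eq_add (pairs : List (String × Int)) (s : List String) :
    pairs.foldl (fun acc p => if acc.contains p.1 then acc else acc ++ [p.1]) s
      = (pairs.map Prod.fst).foldl PySem.Set.add s := by
  induction pairs generalizing s with
  | nil => rfl
  | cons p t ih =>
    rw [List.foldl_cons, List.map_cons, List.foldl_cons, ih]
    congr 1

theorem ofList_append_eq_update (a b : List String) :
    PySem.Set.ofList (a ++ b) = PySem.Set.update (PySem.Set.ofList a) b := by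
  rw [PySem.Set.ofList_eq_foldl, List.foldl_append, ← PySem.Set.ofList_eq_foldl]
  rfl

theorem getD_foldl_modify_addv (l : List (String × Int)) (d : PySem.Dict String Int) (k : String) :
    (l.foldl (fun d p => d.modify p.1 0 (· + p.2)) d).getD k 0
      = d.getD k 0 + (((l.filter (fun p => p.1 == k)).map (·.2)).sum) := by
  induction l generalizing d with
  | nil => simp only [List.foldl_nil, List.filter_nil, List.map_nil, List.sum_nil, add_zero]
  | cons p t ih =>
    rw [List.foldl_cons, ih, PySem.Dict.getD_modify, List.filter_cons]
    by_cases h : p.1 = k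
    · rw [if_pos h.symm, if_pos (by exact beq_iff_eq.2 h), List.map_cons, List.sum_cons, h]
      ring
    · rw [if_neg (fun hk => h hk.symm), if_neg (by simpa using h)]

theorem getD_foldl_insert_zero (ks : List String) (d : PySem.Dict String Int) (x : String)
    (h : d.getD x 0 = 0) :
    (ks.foldl (fun d k => d.insert k 0) d).getD x 0 = 0 := by
  induction ks generalizing d with
  | nil => exact h
  | cons k t ih =>
    refine ih _ ?_
    rw [PySem.Dict.getD_insert]
    by_cases hx : x = k
    · rw [if_pos hx]
    · rw [if_neg hx]; exact h

theorem update_ofList_right (s : PySem.Set String) (xs : List String) :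
    PySem.Set.update s (PySem.Set.ofList xs) = PySem.Set.update s xs := by
  rw [PySem.Set.update_eq_append_filter, PySem.Set.update_eq_append_filter,
    PySem.Set.ofList_ofList]

theorem update_self_of_subset (s : PySem.Set String) (xs : List String)
    (h : ∀ x ∈ xs, x ∈ s) :
    PySem.Set.update s xs = s := by
  rw [PySem.Set.update_eq_append_filter]
  have hfil : List.filter (fun y => !(PySem.Set.contains s y)) (PySem.Set.ofList xs) = [] := by
    rw [List.filter_eq_nil_iff]
    intro a ha
    have hm : a ∈ s := h a ((PySem.Set.mem_ofList xs a).1 ha)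
    simpa using hm
  rw [hfil, List.append_nil]

theorem items_AB (d1 d2 : List (String × Int)) :
    merge_freqs d1 d2 = merge_freqs_alt d1 d2 := by
  unfold merge_freqs merge_freqs_alt
  simp only []
  set s1 : PySem.Dict String Int := d1.foldl (fun d p => d.insert p.1 p.2) PySem.Dict.empty with hs1
  set s2 : PySem.Dict String Int := d2.foldl (fun d p => d.insert p.1 p.2) PySem.Dict.empty with hs2
  set s12 : PySem.Dict String Int := (s1.keys ++ s2.keys).foldl (fun d k => d.insert k 0) PySem.Dict.empty with hs12
  set A : PySem.Dict String Int := d2.foldl (fun d p => d.modify p.1 0 (· + p.2)) (d1.foldl (fun d p => d.modify p.1 0 (· + p.2)) s12) with hA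
  -- key lists
  have hk1 : s1.keys = PySem.Set.ofList (d1.map Prod.fst) := by
    rw [hs1, PySem.Dict.keys_foldl_insert_key (key := Prod.fst) (f := fun d p => p.2),
      PySem.Dict.keys_empty, PySem.Set.update_nil_left]
  have hk2 : s2.keys = PySem.Set.ofList (d2.map Prod.fst) := by
    rw [hs2, PySem.Dict.keys_foldl_insert_key (key := Prod.fst) (f := fun d p => p.2),
      PySem.Dict.keys_empty, PySem.Set.update_nil_left]
  have hk12 : s12.keys = PySem.Set.ofList ((d1 ++ d2).map Prod.fst) := by
    rw [hs12, PySem.Dict.keys_foldl_insert (f := fun d k => 0),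
      PySem.Dict.keys_empty, PySem.Set.update_nil_left, hk1, hk2,
      PySem.Set.ofList_append, PySem.Set.ofList_ofList, update_ofList_right,
      List.map_append, ofList_append_eq_update]
  have hkA : A.keys = s12.keys := by
    rw [hA, PySem.Dict.keys_foldl_modify_key (key := Prod.fst) (f := fun d p => (· + p.2)),
      PySem.Dict.keys_foldl_modify_key (key := Prod.fst) (f := fun d p => (· + p.2))]
    have h1 : PySem.Set.update s12.keys (d1.map Prod.fst) = s12.keys := by
      refine update_self_of_subset _ _ (fun x hx => ?_)
      rw [hk12]
      exact (PySem.Set.mem_ofList _ x).2 (by rw [List.map_append]; exact List.mem_append_left _ hx)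
    have h2 : PySem.Set.update s12.keys (d2.map Prod.fst) = s12.keys := by
      refine update_self_of_subset _ _ (fun x hx => ?_)
      rw [hk12]
      exact (PySem.Set.mem_ofList _ x).2 (by rw [List.map_append]; exact List.mem_append_right _ hx)
    rw [h1, h2]
  have hndA : A.keys.Nodup := by
    rw [hA]
    exact PySem.Dict.nodup_keys_foldl_modify_key _ _ _ _ _
      (PySem.Dict.nodup_keys_foldl_modify_key _ _ _ _ _
        (PySem.Dict.nodup_keys_foldl_insert _ _ _ PySem.Dict.nodup_keys_empty))
  -- values: A's accumulated count is the sum of all matching pairs in d1 ++ d2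
  have hv : ∀ k, A.getD k 0 = (((d1 ++ d2).filter (fun p => p.1 == k)).map (·.2)).sum := by
    intro k
    have hz : s12.getD k 0 = 0 := by
      rw [hs12]
      exact getD_foldl_insert_zero _ _ _ (PySem.Dict.getD_empty _ _)
    rw [hA, getD_foldl_modify_addv, getD_foldl_modify_addv, hz, zero_add,
      List.filter_append, List.map_append, List.sum_append]
  -- conclude
  rw [PySem.Dict.items_eq_map_keys A hndA 0, hkA, hk12, foldl_append_if_eq_add,
    ← PySem.Set.ofList_eq_foldl]
  exact List.map_congr_left (fun k _ => by rw [hv k])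

-- ===== VERDICT (by name: the statement is the Claim_ definition above) =====
theorem merge_freqs_spec : Claim_equal_merge_freqs := by
  intro d1 d2 _
  unfold Spec_merge_freqs
  exact items_AB d1 d2
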